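-- pv_equiv track=rewrite | github.com/fizy069/idea-validation-engine | oasis_validator/scorer.py | _truncate_for_judge
-- ===== SOURCE A (Python) =====
-- from typing import Any, Dict, List, Optional
--
-- def _truncate_for_judge(items: List[str], max_chars: int) -> List[str]:
--     output: List[str] = []
--     used = 0
--     for item in items:
--         normalized = item.strip()
--         if not normalized:
--             continue
--         cost = len(normalized) + 2
--         if used + cost > max_chars:
--             break
--         output.append(normalized)
--         used += cost
--     return output
-- ===== SOURCE B (Python) =====
-- from bisect import bisect_right
-- from itertools import accumulate
-- from typing import List
--
-- def _truncate_for_judge(items: List[str], max_chars: int) -> List[str]: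
--     norm = [t for t in (s.strip() for s in items) if t]
--     prefix = list(accumulate(len(t) + 2 for t in norm))
--     k = bisect_right(prefix, max_chars)
--     return norm[:k]
-- ===== Notes on version B (the rewrite author's own statement) =====
-- stated objective: alternative
-- what changed: A's single accumulate-and-break loop is replaced by a filtered normalized list, a prefix-sum table of per-item costs, and a bisect_right lookup of the cutoff index.
import Mathlib
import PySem

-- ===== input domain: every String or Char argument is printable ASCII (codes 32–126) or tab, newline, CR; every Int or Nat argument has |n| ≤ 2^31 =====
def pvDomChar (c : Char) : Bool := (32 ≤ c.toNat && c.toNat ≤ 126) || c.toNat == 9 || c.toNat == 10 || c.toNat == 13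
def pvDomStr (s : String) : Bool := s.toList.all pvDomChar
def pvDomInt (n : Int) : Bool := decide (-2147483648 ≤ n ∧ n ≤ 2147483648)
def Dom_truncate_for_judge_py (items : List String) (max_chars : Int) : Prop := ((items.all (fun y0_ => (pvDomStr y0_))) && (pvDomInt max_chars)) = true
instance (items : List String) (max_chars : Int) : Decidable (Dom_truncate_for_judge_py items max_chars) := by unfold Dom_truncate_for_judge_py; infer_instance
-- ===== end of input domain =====

-- B replaces A's accumulate-and-break loop by a filtered normalized list, a prefix-sum cost table and a bisect_right cutoff lookup (alternative decomposition, same return value).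


-- ===== PORT A =====
-- Port of A: single loop with accumulator `used`, skip blank-stripped items, break on overflow.
def pvGoA : List String → Int → Int → List String
  | [], _, _ => []
  | item :: rest, max_chars, used =>
    let normalized := PySem.Str.strip item
    if normalized = "" then
      pvGoA rest max_chars used
    else
      let cost : Int := (PySem.Str.len normalized : Int) + 2
      if used + cost > max_chars then []
      else normalized :: pvGoA rest max_chars (used + cost)

def truncate_for_judge_py (items : List String) (max_chars : Int) : List String :=
  pvGoA items max_chars 0

-- ===== PORT B =====
-- Port of B: filtered normalized list, prefix-sum table of costs (itertools.accumulate),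
-- bisect_right(prefix, max_chars) — on the sorted prefix table this is the length of the
-- prefix of entries ≤ max_chars — then norm[:k].
def pvAccum : Int → List Int → List Int
  | _, [] => []
  | acc, c :: cs => (acc + c) :: pvAccum (acc + c) cs

def truncate_for_judge_py_alt (items : List String) (max_chars : Int) : List String :=
  let norm := (items.map PySem.Str.strip).filter (fun t => t ≠ "")
  let prefix_ := pvAccum 0 (norm.map (fun t => (PySem.Str.len t : Int) + 2))
  let k := (prefix_.takeWhile (fun p => decide (p ≤ max_chars))).length
  norm.take k

-- ===== PRECONDITION & SPEC =====
def Spec_truncate_for_judge_py (items : List String) (max_chars : Int) (out : List String) : Prop := out = truncate_for_judge_py_alt items max_chars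
instance (items : List String) (max_chars : Int) (out : List String) : Decidable (Spec_truncate_for_judge_py items max_chars out) := by unfold Spec_truncate_for_judge_py; infer_instance

-- ===== CLAIM (what is proved, stated in full; the proofs are below) =====
def Claim_equal_truncate_for_judge_py : Prop := ∀ (items : List String) (max_chars : Int), Dom_truncate_for_judge_py items max_chars → Spec_truncate_for_judge_py items max_chars (truncate_for_judge_py items max_chars)

-- ===== LEMMAS AND PROOFS =====
theorem pvGoA_eq (items : List String) (max_chars used : Int) :
    pvGoA items max_chars used =
      (let norm := (items.map PySem.Str.strip).filter (fun t => t ≠ "")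
       norm.take ((pvAccum used (norm.map (fun t => (PySem.Str.len t : Int) + 2))).takeWhile
         (fun p => decide (p ≤ max_chars))).length) := by
  induction items generalizing used with
  | nil => simp [pvGoA]
  | cons x xs ih =>
    simp only [pvGoA, List.map_cons, List.filter_cons]
    by_cases hx : PySem.Str.strip x = ""
    · have hf : decide (PySem.Str.strip x ≠ "") = false := by simp [hx]
      rw [if_pos hx, hf]
      simp only [Bool.false_eq_true, if_false]
      exact ih used
    · have ht : decide (PySem.Str.strip x ≠ "") = true := by simp [hx]
      rw [if_neg hx, ht]
      simp only [eq_self_iff_true, if_true, List.map_cons, pvAccum, List.takeWhile_cons]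
      by_cases hc : used + ((PySem.Str.len (PySem.Str.strip x) : Int) + 2) > max_chars
      · have hle : (decide (used + ((PySem.Str.len (PySem.Str.strip x) : Int) + 2) ≤ max_chars)) = false := by
          simp only [decide_eq_false_iff_not]; omega
        rw [if_pos hc, hle]
        simp
      · have hle : (decide (used + ((PySem.Str.len (PySem.Str.strip x) : Int) + 2) ≤ max_chars)) = true := by
          simp only [decide_eq_true_eq]; omega
        rw [if_neg hc, hle]
        simp only [if_true, List.length_cons, List.take_succ_cons]
        rw [ih (used + ((PySem.Str.len (PySem.Str.strip x) : Int) + 2))]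

-- ===== VERDICT (by name: the statement is the Claim_ definition above) =====
theorem truncate_for_judge_py_spec : Claim_equal_truncate_for_judge_py := by
  intro items max_chars _
  unfold Spec_truncate_for_judge_py truncate_for_judge_py truncate_for_judge_py_alt
  exact pvGoA_eq items max_chars 0
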